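-- pv_equiv track=rewrite | github.com/yzhang-math/839sp26_Coding_Agent | main_agent.py | main_agent_sliding_window
-- ===== SOURCE A (Python) =====
-- def main_agent_sliding_window(messages: list[dict], keep_turns: int = 10) -> list[dict]:
--     """Sliding window for Main Agent: always keeps system message and initial user prompt, then last keep_turns turns."""
--     if not messages:
--         return []
--     out = []
--     system_msg = None
--     initial_user_msg = None
--     for m in messages:
--         if m.get("role") == "system":
--             system_msg = m
--             break
--     found_system = False
--     for m in messages:
--         if m.get("role") == "system":
--             found_system = True
--             continue
--         if found_system and m.get("role") == "user" and initial_user_msg is None: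
--             initial_user_msg = m
--             break
--     if system_msg:
--         out.append(system_msg)
--     if initial_user_msg:
--         out.append(initial_user_msg)
--     rest = []
--     found_system = False
--     found_initial_user = False
--     for m in messages:
--         if m.get("role") == "system":
--             found_system = True
--             continue
--         if found_system and not found_initial_user and m.get("role") == "user":
--             found_initial_user = True
--             continue
--         if found_system and found_initial_user:
--             rest.append(m)
--     turns = []
--     i = 0
--     while i < len(rest):
--         if rest[i].get("role") == "assistant":
--             turn = [rest[i]]
--             i += 1
--             while i < len(rest) and rest[i].get("role") in ("user", "tool"):
--                 turn.append(rest[i])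
--                 i += 1
--             turns.append(turn)
--         elif rest[i].get("role") == "user":
--             turn = [rest[i]]
--             i += 1
--             while i < len(rest) and rest[i].get("role") == "tool":
--                 turn.append(rest[i])
--                 i += 1
--             turns.append(turn)
--         else:
--             i += 1
--     for turn in turns[-keep_turns:]:
--         out.extend(turn)
--     return out
-- ===== SOURCE B (Python) =====
-- def main_agent_sliding_window(messages: list[dict], keep_turns: int = 10) -> list[dict]:
--     """Same result as A: index/slice decomposition plus a one-pass streaming turn grouper."""
--     sys_i = next((i for i, m in enumerate(messages) if m.get("role") == "system"), None)
--     if sys_i is None: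
--         return []
--     out = [messages[sys_i]]
--     user_i = next((i for i in range(sys_i + 1, len(messages))
--                    if messages[i].get("role") == "user"), None)
--     if user_i is None:
--         return out
--     out.append(messages[user_i])
--     turns, cur, starter = [], None, None
--     for m in messages[user_i + 1:]:
--         r = m.get("role")
--         if r == "system":
--             continue
--         if r == "assistant":
--             if cur is not None:
--                 turns.append(cur)
--             cur, starter = [m], "assistant"
--         elif r == "user":
--             if cur is not None and starter == "assistant":
--                 cur.append(m)
--             else:
--                 if cur is not None:
--                     turns.append(cur)
--                 cur, starter = [m], "user"
--         elif r == "tool":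
--             if cur is not None:
--                 cur.append(m)
--         else:
--             if cur is not None:
--                 turns.append(cur)
--             cur = None
--     if cur is not None:
--         turns.append(cur)
--     for t in turns[-keep_turns:]:
--         out.extend(t)
--     return out
-- ===== Notes on version B (the rewrite author's own statement) =====
-- stated objective: simpler
-- what changed: B replaces A's three separate flag-carrying rescans of the message list with two index searches plus a single tail slice, and replaces A's index-based while loop with nested inner whiles by a one-pass streaming fold that carries the currently open turn and its starter role.
import Mathlib
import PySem

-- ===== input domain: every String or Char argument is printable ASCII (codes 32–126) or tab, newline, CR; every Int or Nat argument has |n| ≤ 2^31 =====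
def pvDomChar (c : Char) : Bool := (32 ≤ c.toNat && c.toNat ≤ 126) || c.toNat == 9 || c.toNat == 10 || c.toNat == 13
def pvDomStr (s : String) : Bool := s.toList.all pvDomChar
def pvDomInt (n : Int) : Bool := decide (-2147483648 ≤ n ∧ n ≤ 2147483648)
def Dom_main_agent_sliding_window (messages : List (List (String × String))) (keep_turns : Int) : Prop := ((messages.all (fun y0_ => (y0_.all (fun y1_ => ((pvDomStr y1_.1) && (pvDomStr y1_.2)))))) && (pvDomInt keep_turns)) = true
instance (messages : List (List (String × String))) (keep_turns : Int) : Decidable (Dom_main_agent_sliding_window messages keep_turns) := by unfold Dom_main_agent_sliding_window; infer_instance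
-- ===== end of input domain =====

-- B replaces A's three flag-carrying rescans of `messages` by an index/slice decomposition
-- (find the system index, find the first user index after it, slice the tail) and replaces
-- A's nested index-based while loops by a single streaming fold that carries the open turn;
-- objective: simpler, same result.

-- ===== PORT A =====

-- m.get("role")  (first match in the association list, none if absent)
def pvRole (m : List (String × String)) : Option String :=
  (PySem.Dict.mk m).get? "role"

-- first 'for' loop: first message whose role is "system" (break)
def pvAFindSystem : List (List (String × String)) → Option (List (String × String))
  | [] => none
  | m :: ms => if pvRole m == some "system" then some m else pvAFindSystem ms

-- second 'for' loop: first user message once found_system is set (break)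
def pvAInitUser : List (List (String × String)) → Bool → Option (List (String × String))
  | [], _ => none
  | m :: ms, fs =>
    if pvRole m == some "system" then pvAInitUser ms true
    else if fs && (pvRole m == some "user") then some m
    else pvAInitUser ms fs

-- third 'for' loop: build rest with the two flags
def pvARest : List (List (String × String)) → Bool → Bool → List (List (String × String))
  | [], _, _ => []
  | m :: ms, fs, fu =>
    if pvRole m == some "system" then pvARest ms true fu
    else if fs && !fu && (pvRole m == some "user") then pvARest ms fs true
    else if fs && fu then m :: pvARest ms fs fu
    else pvARest ms fs fu

-- the 'while i < len(rest)' loop with its two inner whiles (index advance = structural recursion)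
def pvATurns : List (List (String × String)) → List (List (List (String × String)))
  | [] => []
  | m :: ms =>
    if pvRole m == some "assistant" then
      (m :: ms.takeWhile (fun x => pvRole x == some "user" || pvRole x == some "tool")) ::
        pvATurns (ms.dropWhile (fun x => pvRole x == some "user" || pvRole x == some "tool"))
    else if pvRole m == some "user" then
      (m :: ms.takeWhile (fun x => pvRole x == some "tool")) ::
        pvATurns (ms.dropWhile (fun x => pvRole x == some "tool"))
    else pvATurns ms
  termination_by l => l.length
  decreasing_by
    · exact Nat.lt_succ_of_le (List.length_dropWhile_le _ _)
    · exact Nat.lt_succ_of_le (List.length_dropWhile_le _ _)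
    · exact Nat.lt_succ_self _

def main_agent_sliding_window (messages : List (List (String × String))) (keep_turns : Int) : List (List (String × String)) :=
  if messages.isEmpty then []
  else
    let system_msg := pvAFindSystem messages
    let initial_user_msg := pvAInitUser messages false
    -- 'if system_msg:' / 'if initial_user_msg:' — dict truthiness (None or empty dict is falsy)
    let out : List (List (String × String)) :=
      (match system_msg with
       | some s => if s.isEmpty then [] else [s]
       | none => [])
    let out := out ++
      (match initial_user_msg with
       | some u => if u.isEmpty then [] else [u]
       | none => [])
    let rest := pvARest messages false false
    let turns := pvATurns rest
    -- for turn in turns[-keep_turns:]: out.extend(turn)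
    (PySem.List.slice turns (some (-keep_turns)) none).foldl (fun acc t => acc ++ t) out

-- ===== PORT B =====

-- one fold step of B's streaming turn grouper; state = (closed turns, open turn with its starter role)
def pvBStep (st : List (List (List (String × String))) × Option (String × List (List (String × String))))
    (m : List (String × String)) :
    List (List (List (String × String))) × Option (String × List (List (String × String))) :=
  let r := pvRole m
  if r == some "system" then st
  else if r == some "assistant" then
    (st.1 ++ (match st.2 with | some c => [c.2] | none => []), some ("assistant", [m]))
  else if r == some "user" then
    match st.2 with
    | some c =>
      if c.1 = "assistant" then (st.1, some (c.1, c.2 ++ [m]))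
      else (st.1 ++ [c.2], some ("user", [m]))
    | none => (st.1, some ("user", [m]))
  else if r == some "tool" then
    match st.2 with
    | some c => (st.1, some (c.1, c.2 ++ [m]))
    | none => st
  else
    (st.1 ++ (match st.2 with | some c => [c.2] | none => []), none)

def main_agent_sliding_window_alt (messages : List (List (String × String))) (keep_turns : Int) : List (List (String × String)) :=
  match List.findIdx? (fun m => pvRole m == some "system") messages with
  | none => []
  | some sysI =>
    let out := [messages.getD sysI []]
    match List.findIdx? (fun m => pvRole m == some "user") (messages.drop (sysI + 1)) with
    | none => out
    | some j =>
      let userI := sysI + 1 + j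
      let out := out ++ [messages.getD userI []]
      let st := (messages.drop (userI + 1)).foldl pvBStep ([], none)
      let turns := st.1 ++ (match st.2 with | some c => [c.2] | none => [])
      (PySem.List.slice turns (some (-keep_turns)) none).foldl (fun acc t => acc ++ t) out

-- ===== PRECONDITION & SPEC =====
def Spec_main_agent_sliding_window (messages : List (List (String × String))) (keep_turns : Int) (out : List (List (String × String))) : Prop := out = main_agent_sliding_window_alt messages keep_turns
instance (messages : List (List (String × String))) (keep_turns : Int) (out : List (List (String × String))) : Decidable (Spec_main_agent_sliding_window messages keep_turns out) := by unfold Spec_main_agent_sliding_window; infer_instance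

-- ===== CLAIM (what is proved, stated in full; the proofs are below) =====
def Claim_equal_main_agent_sliding_window : Prop := ∀ (messages : List (List (String × String))) (keep_turns : Int), Dom_main_agent_sliding_window messages keep_turns → Spec_main_agent_sliding_window messages keep_turns (main_agent_sliding_window messages keep_turns)

-- ===== LEMMAS AND PROOFS =====

-- proof-only helpers
def pvFinish (st : List (List (List (String × String))) × Option (String × List (List (String × String)))) :
    List (List (List (String × String))) :=
  st.1 ++ (match st.2 with | some c => [c.2] | none => [])

-- what the rest of the fold contributes, given the open turn
def pvCont (cur : Option (String × List (List (String × String))))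
    (ys : List (List (String × String))) : List (List (List (String × String))) :=
  match cur with
  | none => pvATurns ys
  | some (r, t) =>
    if r = "assistant" then
      (t ++ ys.takeWhile (fun x => pvRole x == some "user" || pvRole x == some "tool")) ::
        pvATurns (ys.dropWhile (fun x => pvRole x == some "user" || pvRole x == some "tool"))
    else
      (t ++ ys.takeWhile (fun x => pvRole x == some "tool")) ::
        pvATurns (ys.dropWhile (fun x => pvRole x == some "tool"))

theorem pvGroup (ys : List (List (String × String)))
    (hs : ∀ m ∈ ys, ¬ pvRole m = some "system") :
    ∀ ts cur, pvFinish (ys.foldl pvBStep (ts, cur)) = ts ++ pvCont cur ys := by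
  induction ys with
  | nil =>
    intro ts cur
    cases cur with
    | none => simp [pvFinish, pvCont, pvATurns]
    | some c => obtain ⟨r, t⟩ := c; by_cases hr : r = "assistant" <;>
        simp [pvFinish, pvCont, pvATurns, hr]
  | cons y ys ih =>
    intro ts cur
    have hy : ¬ pvRole y = some "system" := hs y (by simp)
    have ih' := ih (fun m hm => hs m (by simp [hm]))
    by_cases hA : pvRole y = some "assistant"
    · have h1 : (pvRole y == some "system") = false := by simp [hA]
      have h2 : (pvRole y == some "assistant") = true := by simp [hA]
      simp only [List.foldl_cons, pvBStep, h1, h2, Bool.false_eq_true, if_false, if_true, ih']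
      cases cur with
      | none => simp [pvCont, pvATurns, hA]
      | some c =>
        obtain ⟨r, t⟩ := c
        by_cases hr : r = "assistant" <;>
          simp [pvCont, pvATurns, hA, hr]
    · by_cases hU : pvRole y = some "user"
      · have h1 : (pvRole y == some "system") = false := by simp [hU]
        have h2 : (pvRole y == some "assistant") = false := by simp [hU]
        have h3 : (pvRole y == some "user") = true := by simp [hU]
        simp only [List.foldl_cons, pvBStep, h1, h2, h3, Bool.false_eq_true, if_false, if_true]
        cases cur with
        | none => simp [ih', pvCont, pvATurns, hU]
        | some c =>
          obtain ⟨r, t⟩ := c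
          by_cases hr : r = "assistant" <;>
            simp [ih', pvCont, pvATurns, hU, hr]
      · by_cases hT : pvRole y = some "tool"
        · have h1 : (pvRole y == some "system") = false := by simp [hT]
          have h2 : (pvRole y == some "assistant") = false := by simp [hT]
          have h3 : (pvRole y == some "user") = false := by simp [hT]
          have h4 : (pvRole y == some "tool") = true := by simp [hT]
          simp only [List.foldl_cons, pvBStep, h1, h2, h3, h4, Bool.false_eq_true, if_false, if_true]
          cases cur with
          | none => simp [ih', pvCont, pvATurns, hT]
          | some c =>
            obtain ⟨r, t⟩ := c
            by_cases hr : r = "assistant" <;>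
              simp [ih', pvCont, hT, hr]
        · have h1 : (pvRole y == some "system") = false := by simp [hy]
          have h2 : (pvRole y == some "assistant") = false := by simp [hA]
          have h3 : (pvRole y == some "user") = false := by simp [hU]
          have h4 : (pvRole y == some "tool") = false := by simp [hT]
          simp only [List.foldl_cons, pvBStep, h1, h2, h3, h4, Bool.false_eq_true, if_false]
          cases cur with
          | none => simp [ih', pvCont, pvATurns, hA, hU]
          | some c =>
            obtain ⟨r, t⟩ := c
            by_cases hr : r = "assistant" <;>
              simp [ih', pvCont, pvATurns, hA, hU, hT, hr]

-- pvBStep ignores system messages, so the fold equals the fold over the system-free filter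
theorem pvFoldFilter (ys : List (List (String × String))) :
    ∀ st, ys.foldl pvBStep st = (ys.filter (fun m => !(pvRole m == some "system"))).foldl pvBStep st := by
  induction ys with
  | nil => intro st; rfl
  | cons y ys ih =>
    intro st
    by_cases hS : pvRole y = some "system"
    · simp [hS, pvBStep, ih]
    · have h1 : (pvRole y == some "system") = false := by simp [hS]
      simp [h1, ih]

-- A's first loop over a system-free prefix
theorem pvAFindSystem_append (pre rest : List (List (String × String)))
    (h : ∀ m ∈ pre, ¬ pvRole m = some "system") :
    pvAFindSystem (pre ++ rest) = pvAFindSystem rest := by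
  induction pre with
  | nil => rfl
  | cons p pre ih =>
    have h1 : (pvRole p == some "system") = false := by simp [h p (by simp)]
    simp [pvAFindSystem, h1, ih (fun m hm => h m (by simp [hm]))]

theorem pvAFindSystem_none (ms : List (List (String × String)))
    (h : ∀ m ∈ ms, ¬ pvRole m = some "system") : pvAFindSystem ms = none := by
  have := pvAFindSystem_append ms [] h
  simpa using this

-- A's second loop: system-free prefix is skipped
theorem pvAInitUser_append (pre rest : List (List (String × String)))
    (h : ∀ m ∈ pre, ¬ pvRole m = some "system") :
    pvAInitUser (pre ++ rest) false = pvAInitUser rest false := by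
  induction pre with
  | nil => rfl
  | cons p pre ih =>
    have h1 : (pvRole p == some "system") = false := by simp [h p (by simp)]
    simp [pvAInitUser, h1, ih (fun m hm => h m (by simp [hm]))]

theorem pvAInitUser_false_none (ms : List (List (String × String)))
    (h : ∀ m ∈ ms, ¬ pvRole m = some "system") : pvAInitUser ms false = none := by
  induction ms with
  | nil => rfl
  | cons p ms ih =>
    have h1 : (pvRole p == some "system") = false := by simp [h p (by simp)]
    simp [pvAInitUser, h1, ih (fun m hm => h m (by simp [hm]))]

-- once found_system holds, the second loop is just "first user"
theorem pvAInitUser_true (ms : List (List (String × String))) :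
    pvAInitUser ms true = List.find? (fun m => pvRole m == some "user") ms := by
  induction ms with
  | nil => rfl
  | cons m ms ih =>
    by_cases hS : pvRole m = some "system"
    · have h1 : (pvRole m == some "system") = true := by simp [hS]
      have h2 : (pvRole m == some "user") = false := by simp [hS]
      simp [pvAInitUser, List.find?, h1, h2, ih]
    · have h1 : (pvRole m == some "system") = false := by simp [hS]
      by_cases hU : pvRole m = some "user"
      · have h2 : (pvRole m == some "user") = true := by simp [hU]
        simp [pvAInitUser, List.find?, h1, h2]
      · have h2 : (pvRole m == some "user") = false := by simp [hU]
        simp [pvAInitUser, List.find?, h1, h2, ih]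

-- A's third loop: system-free prefix (flags still false) is skipped
theorem pvARest_append (pre rest : List (List (String × String)))
    (h : ∀ m ∈ pre, ¬ pvRole m = some "system") :
    pvARest (pre ++ rest) false false = pvARest rest false false := by
  induction pre with
  | nil => rfl
  | cons p pre ih =>
    have h1 : (pvRole p == some "system") = false := by simp [h p (by simp)]
    simp [pvARest, h1, ih (fun m hm => h m (by simp [hm]))]

theorem pvARest_false_nil (ms : List (List (String × String)))
    (h : ∀ m ∈ ms, ¬ pvRole m = some "system") : pvARest ms false false = [] := by
  induction ms with
  | nil => rfl
  | cons p ms ih =>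
    have h1 : (pvRole p == some "system") = false := by simp [h p (by simp)]
    simp [pvARest, h1, ih (fun m hm => h m (by simp [hm]))]

-- found_system set, no user yet: user-free prefix is skipped
theorem pvARest_true_append (mid rest : List (List (String × String)))
    (h : ∀ m ∈ mid, ¬ pvRole m = some "user") :
    pvARest (mid ++ rest) true false = pvARest rest true false := by
  induction mid with
  | nil => rfl
  | cons p mid ih =>
    have h2 : (pvRole p == some "user") = false := by simp [h p (by simp)]
    by_cases hS : pvRole p = some "system" <;>
      simp [pvARest, hS, h2, ih (fun m hm => h m (by simp [hm]))]

theorem pvARest_true_false_nil (ms : List (List (String × String)))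
    (h : ∀ m ∈ ms, ¬ pvRole m = some "user") : pvARest ms true false = [] := by
  induction ms with
  | nil => rfl
  | cons p ms ih =>
    have h2 : (pvRole p == some "user") = false := by simp [h p (by simp)]
    by_cases hS : pvRole p = some "system" <;>
      simp [pvARest, hS, h2, ih (fun m hm => h m (by simp [hm]))]

-- both flags set: rest collects everything except system messages
theorem pvARest_true_true (ms : List (List (String × String))) :
    pvARest ms true true = ms.filter (fun m => !(pvRole m == some "system")) := by
  induction ms with
  | nil => rfl
  | cons p ms ih =>
    by_cases hS : pvRole p = some "system" <;>
      simp [pvARest, hS, ih]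

-- user-free prefix for find?
theorem pvFind_user_append (mid : List (List (String × String)))
    (u : List (String × String)) (rest : List (List (String × String)))
    (hmid : ∀ m ∈ mid, ¬ pvRole m = some "user") (hu : pvRole u = some "user") :
    List.find? (fun m => pvRole m == some "user") (mid ++ u :: rest) = some u := by
  induction mid with
  | nil => simp [hu]
  | cons p mid ih =>
    have h2 : (pvRole p == some "user") = false := by simp [hmid p (by simp)]
    simp [h2, ih (fun m hm => hmid m (by simp [hm]))]

-- a message that has a role is a non-empty dict
theorem pvRole_ne_nil (m : List (String × String)) (r : String)
    (h : pvRole m = some r) : m.isEmpty = false := by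
  cases m with
  | nil => simp [pvRole, PySem.Dict.get?] at h
  | cons p ms => rfl

theorem main_agent_sliding_window_core : ∀ (messages : List (List (String × String))) (keep_turns : Int),
    main_agent_sliding_window messages keep_turns = main_agent_sliding_window_alt messages keep_turns := by
  intro messages keep_turns
  unfold main_agent_sliding_window main_agent_sliding_window_alt
  cases hf : List.findIdx? (fun m => pvRole m == some "system") messages with
  | none =>
    have hns : ∀ m ∈ messages, ¬ pvRole m = some "system" := by
      intro m hm
      have := (List.findIdx?_eq_none_iff.mp hf) m hm
      simpa using this
    by_cases hE : messages.isEmpty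
    · simp [hE]
    · simp [hE, pvAFindSystem_none messages hns, pvAInitUser_false_none messages hns,
        pvARest_false_nil messages hns, pvATurns, PySem.List.slice_some_none]
  | some sysI =>
    obtain ⟨hlt, hps, hjpre⟩ := List.findIdx?_eq_some_iff_getElem.mp hf
    have hsys : pvRole messages[sysI] = some "system" := by simpa using hps
    have hsplit : messages = messages.take sysI ++ messages[sysI] :: messages.drop (sysI + 1) := by
      conv_lhs => rw [← List.take_append_drop sysI messages, ← List.getElem_cons_drop hlt]
    have hpre : ∀ m ∈ messages.take sysI, ¬ pvRole m = some "system" := by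
      intro m hm
      obtain ⟨j, hj, rfl⟩ := List.mem_take_iff_getElem.mp hm
      have := hjpre j (lt_of_lt_of_le hj (min_le_left _ _))
      simpa using this
    have hE : messages.isEmpty = false := by
      cases messages with
      | nil => simp at hlt
      | cons a l => rfl
    have hFind : pvAFindSystem messages = some messages[sysI] := by
      conv_lhs => rw [hsplit]
      rw [pvAFindSystem_append _ _ hpre]
      simp [pvAFindSystem, hsys]
    have hInit : pvAInitUser messages false =
        List.find? (fun m => pvRole m == some "user") (messages.drop (sysI + 1)) := by
      conv_lhs => rw [hsplit]
      rw [pvAInitUser_append _ _ hpre]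
      simp [pvAInitUser, hsys, pvAInitUser_true]
    have hRest : pvARest messages false false = pvARest (messages.drop (sysI + 1)) true false := by
      conv_lhs => rw [hsplit]
      rw [pvARest_append _ _ hpre]
      simp [pvARest, hsys]
    cases hg : List.findIdx? (fun m => pvRole m == some "user") (messages.drop (sysI + 1)) with
    | none =>
      have hnu : ∀ m ∈ messages.drop (sysI + 1), ¬ pvRole m = some "user" := by
        intro m hm
        have := (List.findIdx?_eq_none_iff.mp hg) m hm
        simpa using this
      have hInit' : pvAInitUser messages false = none := by
        rw [hInit, List.find?_eq_none]
        intro m hm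
        simpa using hnu m hm
      have hRest' : pvARest messages false false = [] := by
        rw [hRest]; exact pvARest_true_false_nil _ hnu
      simp [hE, hg, hFind, hInit', hRest', pvATurns, List.getElem?_eq_getElem hlt,
        pvRole_ne_nil messages[sysI] "system" hsys, PySem.List.slice_some_none]
    | some j =>
      obtain ⟨hjlt, hpu, hju⟩ := List.findIdx?_eq_some_iff_getElem.mp hg
      have hjl : sysI + 1 + j < messages.length := by
        have hjlt' := hjlt; simp [List.length_drop] at hjlt'; omega
      have hadd : sysI + 1 + j + 1 = sysI + 1 + (j + 1) := by omega
      have hdropj : (messages.drop (sysI + 1))[j] = messages[sysI + 1 + j] := List.getElem_drop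
      have huser : pvRole messages[sysI + 1 + j] = some "user" := by
        rw [← hdropj]; simpa using hpu
      have hnsys : ¬ pvRole messages[sysI + 1 + j] = some "system" := by simp [huser]
      have hsplit2 : messages.drop (sysI + 1) =
          (messages.drop (sysI + 1)).take j ++ messages[sysI + 1 + j] :: messages.drop (sysI + 1 + (j + 1)) := by
        conv_lhs => rw [← List.take_append_drop j (messages.drop (sysI + 1)), ← List.getElem_cons_drop hjlt]
        rw [hdropj, List.drop_drop]
      have hmid : ∀ m ∈ (messages.drop (sysI + 1)).take j, ¬ pvRole m = some "user" := by
        intro m hm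
        obtain ⟨k, hk, rfl⟩ := List.mem_take_iff_getElem.mp hm
        have := hju k (lt_of_lt_of_le hk (min_le_left _ _))
        simpa using this
      have hInit' : pvAInitUser messages false = some messages[sysI + 1 + j] := by
        rw [hInit]
        conv_lhs => rw [hsplit2]
        exact pvFind_user_append _ _ _ hmid huser
      have hRest' : pvARest messages false false =
          (messages.drop (sysI + 1 + (j + 1))).filter (fun m => !(pvRole m == some "system")) := by
        rw [hRest]
        conv_lhs => rw [hsplit2]
        rw [pvARest_true_append _ _ hmid]
        simp [pvARest, huser, pvARest_true_true]
      have hFold : pvFinish ((messages.drop (sysI + 1 + (j + 1))).foldl pvBStep ([], none)) =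
          pvATurns ((messages.drop (sysI + 1 + (j + 1))).filter (fun m => !(pvRole m == some "system"))) := by
        rw [pvFoldFilter]
        rw [pvGroup _ (by
          intro m hm
          have := List.of_mem_filter hm
          simpa using this) [] none]
        simp [pvCont]
      simp only [pvFinish] at hFold
      simp [hE, hg, hFind, hInit', hRest', hadd, hFold, List.getElem?_eq_getElem hlt,
        List.getElem?_eq_getElem hjl,
        pvRole_ne_nil messages[sysI] "system" hsys, pvRole_ne_nil messages[sysI + 1 + j] "user" huser]

-- ===== VERDICT (by name: the statement is the Claim_ definition above) =====
theorem main_agent_sliding_window_spec : Claim_equal_main_agent_sliding_window := by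
  intro messages keep_turns _
  exact main_agent_sliding_window_core messages keep_turns
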